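-- pv_equiv track=rewrite | github.com/schrezraoeder/leetcode_windows11_november2022 | 0074-search-a-2d-matrix/0074-search-a-2d-matrix.py | _which_row_game
-- ===== SOURCE A (Python) =====
-- def _which_row_game(matrix, target):
--     ix = -1
--     if target < matrix[0][0]:
--         return ix
--     for ix in range(len(matrix)):
--         if matrix[ix][0] <= target and matrix[ix][(len(matrix[ix])-1)] >= target:
--             return ix
--     ix = -1
--     return ix
-- ===== SOURCE B (Python) =====
-- def _which_row_game(matrix, target):
--     if target < matrix[0][0]:
--         return -1
--     return _first_match(matrix, target, 0, len(matrix))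
--
--
-- def _first_match(matrix, target, lo, hi):
--     """Leftmost index in [lo, hi) whose row brackets target, or -1.
--
--     Divide and conquer: solve the left half; only if it has no match,
--     solve the right half.
--     """
--     if hi - lo == 0:
--         return -1
--     if hi - lo == 1:
--         row = matrix[lo]
--         return lo if row[0] <= target <= row[-1] else -1
--     mid = (lo + hi) // 2
--     left = _first_match(matrix, target, lo, mid)
--     return left if left != -1 else _first_match(matrix, target, mid, hi)
-- ===== Notes on version B (the rewrite author's own statement) =====
-- stated objective: alternative
-- what changed: B finds the leftmost bracketing row by divide and conquer on the index interval (solve the left half, fall back to the right half only when it is empty of matches) instead of A's single indexed forward loop; Pre_ excludes only inputs on which A raises IndexError (empty matrix, empty first row, or an empty row reached by the scan before any bracketing row).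
import Mathlib
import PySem

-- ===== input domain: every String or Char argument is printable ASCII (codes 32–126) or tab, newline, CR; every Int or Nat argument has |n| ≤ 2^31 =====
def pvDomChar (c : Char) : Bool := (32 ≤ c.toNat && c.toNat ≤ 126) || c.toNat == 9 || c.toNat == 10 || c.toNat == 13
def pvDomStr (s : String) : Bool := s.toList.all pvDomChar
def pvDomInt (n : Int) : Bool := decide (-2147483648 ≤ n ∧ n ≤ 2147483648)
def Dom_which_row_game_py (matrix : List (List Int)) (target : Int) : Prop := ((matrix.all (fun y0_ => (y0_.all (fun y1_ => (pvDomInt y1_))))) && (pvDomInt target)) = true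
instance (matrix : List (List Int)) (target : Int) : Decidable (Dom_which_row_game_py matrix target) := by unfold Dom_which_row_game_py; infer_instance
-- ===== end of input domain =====

-- B finds the leftmost bracketing row by divide and conquer on the index interval
-- instead of A's indexed forward loop (objective: alternative, same cost).


-- ===== PORT A =====
-- A's for-loop over ix in range(len(matrix)) with early return: the remaining
-- indices are carried as a list (structural recursion)
def whichRowAGo (matrix : List (List Int)) (target : Int) : List Nat → Int
  | [] => -1
  | ix :: rest =>
    let row := matrix.getD ix []
    if row.getD 0 0 ≤ target ∧ row.getD (row.length - 1) 0 ≥ target then (ix : Int)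
    else whichRowAGo matrix target rest

def which_row_game_py (matrix : List (List Int)) (target : Int) : Int :=
  if target < (matrix.getD 0 []).getD 0 0 then -1
  else whichRowAGo matrix target (List.range matrix.length)

-- ===== PORT B =====
-- B's helper: leftmost index in [lo, hi) whose row brackets target, else -1, by
-- divide and conquer (left half first, right half only if the left has no match);
-- the fuel argument only makes the recursion structural: matrix.length fuel always suffices
def firstMatch (matrix : List (List Int)) (target : Int) : Nat → Nat → Nat → Int
  | 0, _, _ => -1
  | fuel + 1, lo, hi =>
    if hi - lo = 0 then -1
    else if hi - lo = 1 then
      let row := matrix.getD lo []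
      if row.getD 0 0 ≤ target ∧ target ≤ row.getD (row.length - 1) 0 then (lo : Int) else -1
    else
      let mid := (lo + hi) / 2
      let left := firstMatch matrix target fuel lo mid
      if left ≠ -1 then left else firstMatch matrix target fuel mid hi

def which_row_game_py_alt (matrix : List (List Int)) (target : Int) : Int :=
  if target < (matrix.getD 0 []).getD 0 0 then -1
  else firstMatch matrix target matrix.length 0 matrix.length

-- ===== PRECONDITION & SPEC =====
-- Pre_ excludes exactly the inputs on which A raises IndexError: the empty matrix,
-- an empty first row, and (when the scan runs) an empty row that the scan reaches
-- before any bracketing row.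
def Pre_which_row_game_py (matrix : List (List Int)) (target : Int) : Prop :=
  matrix ≠ [] ∧ matrix.headD [] ≠ [] ∧
  (¬ target < (matrix.headD []).getD 0 0 →
    ∀ k < matrix.length, matrix.getD k [] = [] →
      ∃ j < k, (matrix.getD j []).getD 0 0 ≤ target ∧
        target ≤ (matrix.getD j []).getD ((matrix.getD j []).length - 1) 0)
instance (matrix : List (List Int)) (target : Int) : Decidable (Pre_which_row_game_py matrix target) := by unfold Pre_which_row_game_py; infer_instance

def pvWitness_which_row_game_py : List (List Int) × Int := ([[1, 3], [5, 7]], 6)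

def Spec_which_row_game_py (matrix : List (List Int)) (target : Int) (out : Int) : Prop := out = which_row_game_py_alt matrix target
instance (matrix : List (List Int)) (target : Int) (out : Int) : Decidable (Spec_which_row_game_py matrix target out) := by unfold Spec_which_row_game_py; infer_instance

-- ===== CLAIM (what is proved, stated in full; the proofs are below) =====
def Claim_equal_which_row_game_py : Prop := ∀ (matrix : List (List Int)) (target : Int), Dom_which_row_game_py matrix target → Pre_which_row_game_py matrix target → Spec_which_row_game_py matrix target (which_row_game_py matrix target)

-- ===== LEMMAS AND PROOFS =====

-- the two row conditions, named for the proofs only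
abbrev brA (matrix : List (List Int)) (target : Int) (i : Nat) : Prop :=
  (matrix.getD i []).getD 0 0 ≤ target ∧ (matrix.getD i []).getD ((matrix.getD i []).length - 1) 0 ≥ target
abbrev brB (matrix : List (List Int)) (target : Int) (i : Nat) : Prop :=
  (matrix.getD i []).getD 0 0 ≤ target ∧ target ≤ (matrix.getD i []).getD ((matrix.getD i []).length - 1) 0

theorem brA_iff_brB (matrix : List (List Int)) (target : Int) (i : Nat) :
    brA matrix target i ↔ brB matrix target i := by
  unfold brA brB; exact and_congr_right fun _ => ge_iff_le

-- proof-side linear reference scan over [lo, hi)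
def linScan (matrix : List (List Int)) (target : Int) (lo hi : Nat) : Int :=
  if lo < hi then
    if brB matrix target lo then (lo : Int)
    else linScan matrix target (lo + 1) hi
  else -1
termination_by hi - lo

theorem firstMatch_unfold (matrix : List (List Int)) (target : Int) (fuel lo hi : Nat) :
    firstMatch matrix target (fuel + 1) lo hi =
      if hi - lo = 0 then -1
      else if hi - lo = 1 then
        (if brB matrix target lo then (lo : Int) else -1)
      else
        (if firstMatch matrix target fuel lo ((lo + hi) / 2) ≠ -1 then
          firstMatch matrix target fuel lo ((lo + hi) / 2)
         else firstMatch matrix target fuel ((lo + hi) / 2) hi) := by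
  rfl

-- splitting the linear scan at a midpoint
theorem linScan_split (matrix : List (List Int)) (target : Int) (lo mid hi : Nat)
    (h1 : lo ≤ mid) (h2 : mid ≤ hi) :
    linScan matrix target lo hi =
      if linScan matrix target lo mid ≠ -1 then linScan matrix target lo mid
      else linScan matrix target mid hi := by
  rcases Nat.eq_or_lt_of_le h1 with heq | hlt
  · subst heq
    have h : linScan matrix target lo lo = -1 := by rw [linScan]; simp
    simp [h]
  · have hlohi : lo < hi := lt_of_lt_of_le hlt h2
    rw [linScan, if_pos hlohi]
    conv_rhs => rw [linScan, if_pos hlt]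
    by_cases hc : brB matrix target lo
    · have hne : ((lo : Int)) ≠ -1 := by
        have := Int.natCast_nonneg lo; omega
      rw [if_pos hc, if_pos hc, if_pos hne]
    · rw [if_neg hc, if_neg hc]
      exact linScan_split matrix target (lo + 1) mid hi hlt h2
termination_by mid - lo

-- B's divide and conquer equals the linear scan whenever the fuel covers the interval
theorem firstMatch_eq_linScan (matrix : List (List Int)) (target : Int) (fuel lo hi : Nat)
    (hf : hi - lo ≤ fuel) :
    firstMatch matrix target fuel lo hi = linScan matrix target lo hi := by
  induction fuel generalizing lo hi with
  | zero =>
    have h0 : ¬ lo < hi := by omega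
    rw [linScan, if_neg h0]; rfl
  | succ fuel ih =>
    rw [firstMatch_unfold]
    by_cases h0 : hi - lo = 0
    · rw [if_pos h0, linScan, if_neg (by omega)]
    · rw [if_neg h0]
      by_cases h1 : hi - lo = 1
      · rw [if_pos h1]
        have hlt : lo < hi := by omega
        rw [linScan, if_pos hlt]
        by_cases hc : brB matrix target lo
        · rw [if_pos hc, if_pos hc]
        · rw [if_neg hc, if_neg hc]
          have hsucc : lo + 1 = hi := by omega
          rw [hsucc, linScan, if_neg (by omega)]
      · rw [if_neg h1]
        rw [ih lo ((lo + hi) / 2) (by omega), ih ((lo + hi) / 2) hi (by omega)]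
        exact (linScan_split matrix target lo ((lo + hi) / 2) hi (by omega) (by omega)).symm

-- A's loop over range' i n equals the linear scan over [i, i + n)
theorem whichRowAGo_eq_linScan (matrix : List (List Int)) (target : Int) (n i : Nat) :
    whichRowAGo matrix target (List.range' i n) = linScan matrix target i (i + n) := by
  induction n generalizing i with
  | zero =>
    rw [List.range'_zero, linScan, if_neg (by omega)]; rfl
  | succ n ih =>
    rw [List.range'_succ, whichRowAGo]
    by_cases hc : brB matrix target i
    · rw [if_pos ((brA_iff_brB matrix target i).mpr hc), linScan,
        if_pos (by omega), if_pos hc]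
    · rw [if_neg (fun ha => hc ((brA_iff_brB matrix target i).mp ha)), ih (i + 1)]
      conv_rhs => rw [linScan]
      rw [if_pos (by omega), if_neg hc]
      congr 1
      omega

-- ===== VERDICT (by name: the statement is the Claim_ definition above) =====
theorem which_row_game_py_spec : Claim_equal_which_row_game_py := by
  intro matrix target _ _
  unfold Spec_which_row_game_py which_row_game_py which_row_game_py_alt
  by_cases hg : target < (matrix.getD 0 []).getD 0 0
  · rw [if_pos hg, if_pos hg]
  · rw [if_neg hg, if_neg hg, firstMatch_eq_linScan matrix target _ _ _ (by omega),
      List.range_eq_range', whichRowAGo_eq_linScan]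
    simp
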